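-- pv_equiv track=rewrite | github.com/ericckang/Competitive-Programming | Out of Sorts.py | can_be_found
-- ===== SOURCE A (Python) =====
-- def can_be_found(seq, index):
--     n = len(seq)
--     elem = seq[index]
--     l, r = 0, n - 1
--
--     while l <= r:
--         mid = (l + r) // 2
--
--         if mid == index:
--             if (l == mid or max(seq[l:mid]) < elem) and (mid == r or elem < min(seq[mid + 1:r + 1])):
--                 return True
--             else:
--                 return False
--
--         elif seq[mid] < elem:
--             l = mid + 1
--         else:
--             r = mid - 1
--
--     return False
-- ===== SOURCE B (Python) =====
-- def can_be_found(seq, index):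
--     elem = seq[index]
--
--     def window(l, r):
--         # final window [l, r] whose midpoint is index, or None if the element
--         # at some midpoint on the forced descent path contradicts the step
--         # needed to move the search toward index
--         if l > r:
--             return None
--         mid = (l + r) // 2
--         if mid == index:
--             return (l, r)
--         if mid < index:
--             return window(mid + 1, r) if seq[mid] < elem else None
--         return window(l, mid - 1) if elem <= seq[mid] else None
--
--     w = window(0, len(seq) - 1)
--     if w is None:
--         return False
--     l, r = w
--     return all(seq[j] < elem for j in range(l, index)) and \
--            all(elem < seq[j] for j in range(index + 1, r + 1))
-- ===== Notes on version B (the rewrite author's own statement) =====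
-- stated objective: alternative
-- what changed: B splits the task into two phases: a recursive 'window' helper that follows the descent path forced by the target index (returning the final window as a pair, or None as soon as an element on the path contradicts the step needed to move toward index), and a separate validator that checks the neighbors of the window with all() over index ranges instead of A's comparison-driven while loop with guarded max()/min() over slices.
import Mathlib
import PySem

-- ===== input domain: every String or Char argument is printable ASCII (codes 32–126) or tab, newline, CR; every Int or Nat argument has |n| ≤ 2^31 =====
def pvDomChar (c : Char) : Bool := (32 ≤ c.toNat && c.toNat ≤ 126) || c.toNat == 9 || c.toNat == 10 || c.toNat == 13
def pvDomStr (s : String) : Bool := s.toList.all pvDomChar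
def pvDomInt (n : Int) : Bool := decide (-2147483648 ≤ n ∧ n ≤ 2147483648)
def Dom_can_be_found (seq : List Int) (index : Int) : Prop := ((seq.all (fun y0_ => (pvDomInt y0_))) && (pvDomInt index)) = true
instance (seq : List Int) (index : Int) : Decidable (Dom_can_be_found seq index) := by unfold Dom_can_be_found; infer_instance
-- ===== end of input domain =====

-- B is a two-phase re-decomposition: an index-steered recursive 'window' finder returning an Option pair, then a separate neighbor validator over index ranges; objective: alternative (same cost). Equivalence is proved on Pre_ (index in range).


-- ===== PORT A =====
-- A's while loop, as structural recursion on a fuel counter (fuel = len(seq)+1 at the call,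
-- strictly more than the number of iterations the shrinking range allows, so the fuel-0
-- fallback is never reached); mid = (l+r)//2 written inline
def canA_loop (seq : List Int) (elem index : Int) : Nat → Int → Int → Bool
  | 0, _, _ => false
  | fuel + 1, l, r =>
    if l ≤ r then
      if PySem.Int.floordiv (l + r) 2 = index then
        (decide (l = PySem.Int.floordiv (l + r) 2) ||
          (match PySem.List.max? (PySem.List.slice seq (some l) (some (PySem.Int.floordiv (l + r) 2))) (fun y => y) with
           | some m => decide (m < elem)
           | none => false)) &&
        (decide (PySem.Int.floordiv (l + r) 2 = r) ||
          (match PySem.List.min? (PySem.List.slice seq (some (PySem.Int.floordiv (l + r) 2 + 1)) (some (r + 1))) (fun y => y) with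
           | some m => decide (elem < m)
           | none => false))
      else if PySem.List.pyGetD seq (PySem.Int.floordiv (l + r) 2) 0 < elem then
        canA_loop seq elem index fuel (PySem.Int.floordiv (l + r) 2 + 1) r
      else
        canA_loop seq elem index fuel l (PySem.Int.floordiv (l + r) 2 - 1)
    else false

def can_be_found (seq : List Int) (index : Int) : Bool :=
  -- seq[index] raises IndexError when index is out of range; excluded by Pre_
  match PySem.List.pyGet? seq index with
  | none => false
  | some elem => canA_loop seq elem index (seq.length + 1) 0 (seq.length - 1)

-- ===== PORT B =====
-- B phase 1: the recursive window finder; returns the final window (l, r) whose midpoint is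
-- index, or none when an element on the forced descent path contradicts the needed step.
-- Fuel-style totality guard as for A; never reached at the call below.
def canB_window (seq : List Int) (elem index : Int) : Nat → Int → Int → Option (Int × Int)
  | 0, _, _ => none
  | fuel + 1, l, r =>
    if l > r then none
    else
      let mid := PySem.Int.floordiv (l + r) 2
      if mid = index then some (l, r)
      else if mid < index then
        if PySem.List.pyGetD seq mid 0 < elem then canB_window seq elem index fuel (mid + 1) r else none
      else
        if elem ≤ PySem.List.pyGetD seq mid 0 then canB_window seq elem index fuel l (mid - 1) else none

def can_be_found_alt (seq : List Int) (index : Int) : Bool :=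
  match PySem.List.pyGet? seq index with
  | none => false
  | some elem =>
    -- B phase 2: validate the window's neighbors with all() over the two index ranges
    match canB_window seq elem index (seq.length + 1) 0 ((seq.length : Int) - 1) with
    | none => false
    | some (l, r) =>
      (PySem.List.pyRange l index 1).all (fun j => decide (PySem.List.pyGetD seq j 0 < elem)) &&
      (PySem.List.pyRange (index + 1) (r + 1) 1).all (fun j => decide (elem < PySem.List.pyGetD seq j 0))

-- ===== PRECONDITION & SPEC =====
-- Pre_ excludes exactly the inputs where Python A raises IndexError at seq[index] (B raises there too).
def Pre_can_be_found (seq : List Int) (index : Int) : Prop :=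
  PySem.Raise.InRange seq.length index
instance (seq : List Int) (index : Int) : Decidable (Pre_can_be_found seq index) := by
  unfold Pre_can_be_found; infer_instance
def pvWitness_can_be_found : List Int × Int := ([3, 1, 2], 1)

def Spec_can_be_found (seq : List Int) (index : Int) (out : Bool) : Prop := out = can_be_found_alt seq index
instance (seq : List Int) (index : Int) (out : Bool) : Decidable (Spec_can_be_found seq index out) := by unfold Spec_can_be_found; infer_instance

-- ===== CLAIM (what is proved, stated in full; the proofs are below) =====
def Claim_equal_can_be_found : Prop := ∀ (seq : List Int) (index : Int), Dom_can_be_found seq index → Pre_can_be_found seq index → Spec_can_be_found seq index (can_be_found seq index)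

-- ===== LEMMAS AND PROOFS =====

-- once index has left [l, r], A's loop can never hit mid = index and finally returns False
theorem canA_loop_false (seq : List Int) (elem index : Int) :
    ∀ (fuel : Nat) (l r : Int), index < l ∨ r < index →
      canA_loop seq elem index fuel l r = false := by
  intro fuel
  induction fuel with
  | zero => intro l r _; rfl
  | succ fuel ih =>
    intro l r hout
    by_cases h : l ≤ r
    · have hb := PySem.Int.floordiv_two_mid_bounds h
      rw [canA_loop, if_pos h,
        if_neg (show ¬ (PySem.Int.floordiv (l + r) 2 = index) by omega)]
      by_cases hc : PySem.List.pyGetD seq (PySem.Int.floordiv (l + r) 2) 0 < elem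
      · rw [if_pos hc]
        exact ih (PySem.Int.floordiv (l + r) 2 + 1) r (by omega)
      · rw [if_neg hc]
        exact ih l (PySem.Int.floordiv (l + r) 2 - 1) (by omega)
    · rw [canA_loop, if_neg h]

-- a slice with in-range bounds is the element map over the corresponding index range
theorem slice_eq_map_range (seq : List Int) :
    ∀ (d : Nat) (a b : Int), 0 ≤ a → a ≤ b → (b - a).toNat = d → b ≤ (seq.length : Int) →
      PySem.List.slice seq (some a) (some b) =
        (PySem.List.pyRange a b 1).map (fun j => PySem.List.pyGetD seq j 0) := by
  intro d
  induction d with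
  | zero =>
    intro a b h0 hab hd hb
    have hba : b ≤ a := by omega
    rw [PySem.List.pyRange_one_eq_nil hba, PySem.List.slice_toNat seq h0 (by omega)]
    simp
    omega
  | succ d ih =>
    intro a b h0 _ hd hb
    have hab : a < b := by omega
    rw [PySem.List.pyRange_one_cons hab, List.map_cons,
      ← ih (a + 1) b (by omega) (by omega) (by omega) hb]
    have halen : a.toNat < seq.length := by omega
    have hget : PySem.List.pyGetD seq a 0 = seq[a.toNat] :=
      PySem.List.pyGetD_eq_getElem seq 0 h0 (by omega)
    rw [PySem.List.slice_toNat seq h0 (by omega),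
      PySem.List.slice_toNat seq (by omega : (0:Int) ≤ a + 1) (by omega), hget]
    have hdrop : seq.drop a.toNat = seq[a.toNat] :: seq.drop (a.toNat + 1) :=
      List.drop_eq_getElem_cons halen
    rw [hdrop]
    have h1 : (a + 1).toNat = a.toNat + 1 := by omega
    have h2 : b.toNat - a.toNat = (b.toNat - (a + 1).toNat) + 1 := by omega
    rw [h2, List.take_succ_cons, h1]

-- the guarded max() test of A equals B's all()-over-range on the left neighbors
theorem left_check_eq (seq : List Int) (elem l m : Int) (h0 : 0 ≤ l) (hlm : l ≤ m)
    (hm : m ≤ (seq.length : Int)) :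
    (decide (l = m) ||
      (match PySem.List.max? (PySem.List.slice seq (some l) (some m)) (fun y => y) with
       | some x => decide (x < elem)
       | none => false)) =
    (PySem.List.pyRange l m 1).all (fun j => decide (PySem.List.pyGetD seq j 0 < elem)) := by
  by_cases hlm' : l = m
  · subst hlm'
    rw [PySem.List.pyRange_one_eq_nil (le_refl l)]
    simp
  · have hlt : l < m := by omega
    rw [slice_eq_map_range seq (m - l).toNat l m h0 hlm rfl hm]
    cases hmx : PySem.List.max? ((PySem.List.pyRange l m 1).map (fun j => PySem.List.pyGetD seq j 0)) (fun y => y) with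
    | none =>
      have := (PySem.List.max?_eq_none_iff _ (fun y => y)).mp hmx
      rw [List.map_eq_nil_iff] at this
      rw [PySem.List.pyRange_one_cons hlt] at this
      exact absurd this (by simp)
    | some x =>
      have hmem := PySem.List.max?_mem hmx
      have hmax := PySem.List.max?_isMax hmx
      simp only [decide_eq_false hlm', Bool.false_or]
      cases hall : (PySem.List.pyRange l m 1).all (fun j => decide (PySem.List.pyGetD seq j 0 < elem)) with
      | true =>
        rw [List.mem_map] at hmem
        obtain ⟨j, hj, hjx⟩ := hmem
        have := List.all_eq_true.mp hall j hj
        simp only [decide_eq_true_eq] at this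
        simp [← hjx, this]
      | false =>
        rw [List.all_eq_false] at hall
        obtain ⟨j, hj, hje⟩ := hall
        have hxm := hmax _ (List.mem_map.mpr ⟨j, hj, rfl⟩)
        simp only [decide_eq_true_eq, decide_eq_false_iff_not, not_lt] at hje ⊢
        simp only at hxm
        omega

-- the guarded min() test of A equals B's all()-over-range on the right neighbors
theorem right_check_eq (seq : List Int) (elem m r : Int) (h0 : 0 ≤ m) (hmr : m ≤ r)
    (hr : r + 1 ≤ (seq.length : Int)) :
    (decide (m = r) ||
      (match PySem.List.min? (PySem.List.slice seq (some (m + 1)) (some (r + 1))) (fun y => y) with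
       | some x => decide (elem < x)
       | none => false)) =
    (PySem.List.pyRange (m + 1) (r + 1) 1).all (fun j => decide (elem < PySem.List.pyGetD seq j 0)) := by
  by_cases hmr' : m = r
  · subst hmr'
    rw [PySem.List.pyRange_one_eq_nil (le_refl (m + 1))]
    simp
  · have hlt : m + 1 < r + 1 := by omega
    rw [slice_eq_map_range seq (r + 1 - (m + 1)).toNat (m + 1) (r + 1) (by omega) (by omega) rfl hr]
    cases hmx : PySem.List.min? ((PySem.List.pyRange (m + 1) (r + 1) 1).map (fun j => PySem.List.pyGetD seq j 0)) (fun y => y) with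
    | none =>
      have := (PySem.List.min?_eq_none_iff _ (fun y => y)).mp hmx
      rw [List.map_eq_nil_iff] at this
      rw [PySem.List.pyRange_one_cons hlt] at this
      exact absurd this (by simp)
    | some x =>
      have hmem := PySem.List.min?_mem hmx
      have hmin := PySem.List.min?_isMin hmx
      simp only [decide_eq_false hmr', Bool.false_or]
      cases hall : (PySem.List.pyRange (m + 1) (r + 1) 1).all (fun j => decide (elem < PySem.List.pyGetD seq j 0)) with
      | true =>
        rw [List.mem_map] at hmem
        obtain ⟨j, hj, hjx⟩ := hmem
        have := List.all_eq_true.mp hall j hj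
        simp only [decide_eq_true_eq] at this
        simp [← hjx, this]
      | false =>
        rw [List.all_eq_false] at hall
        obtain ⟨j, hj, hje⟩ := hall
        have hxm := hmin _ (List.mem_map.mpr ⟨j, hj, rfl⟩)
        simp only [decide_eq_true_eq, decide_eq_false_iff_not, not_lt] at hje ⊢
        simp only at hxm
        omega

-- A's loop equals B's window finder followed by B's validator, on any in-range window
theorem loop_eq_window (seq : List Int) (elem index : Int) :
    ∀ (fuel : Nat) (l r : Int), 0 ≤ l → r < (seq.length : Int) →
      canA_loop seq elem index fuel l r =
        (match canB_window seq elem index fuel l r with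
         | none => false
         | some (l', r') =>
           (PySem.List.pyRange l' index 1).all (fun j => decide (PySem.List.pyGetD seq j 0 < elem)) &&
           (PySem.List.pyRange (index + 1) (r' + 1) 1).all (fun j => decide (elem < PySem.List.pyGetD seq j 0))) := by
  intro fuel
  induction fuel with
  | zero => intro l r _ _; rfl
  | succ fuel ih =>
    intro l r hl hr
    by_cases h : l ≤ r
    · have hb := PySem.Int.floordiv_two_mid_bounds h
      rw [canA_loop, canB_window, if_pos h, if_neg (show ¬ l > r by omega)]
      set m := PySem.Int.floordiv (l + r) 2 with hm
      by_cases hmid : m = index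
      · rw [if_pos hmid, if_pos hmid]
        simp only
        rw [← hmid,
          left_check_eq seq elem l m hl (by omega) (by omega),
          right_check_eq seq elem m r (by omega) (by omega) (by omega)]
      · rw [if_neg hmid, if_neg hmid]
        by_cases hdir : m < index
        · rw [if_pos hdir]
          by_cases hc : PySem.List.pyGetD seq m 0 < elem
          · rw [if_pos hc, if_pos hc]
            exact ih (m + 1) r (by omega) hr
          · rw [if_neg hc, if_neg hc]
            exact canA_loop_false seq elem index fuel l (m - 1) (Or.inr (by omega))
        · rw [if_neg hdir]
          by_cases hc : PySem.List.pyGetD seq m 0 < elem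
          · rw [if_pos hc, if_neg (show ¬ elem ≤ PySem.List.pyGetD seq m 0 by omega)]
            exact canA_loop_false seq elem index fuel (m + 1) r (Or.inl (by omega))
          · rw [if_neg hc, if_pos (show elem ≤ PySem.List.pyGetD seq m 0 by omega)]
            exact ih l (m - 1) hl (by omega)
    · rw [canA_loop, canB_window, if_neg h, if_pos (show l > r by omega)]

-- ===== VERDICT (by name: the statement is the Claim_ definition above) =====
theorem can_be_found_spec : Claim_equal_can_be_found := by
  intro seq index _ _
  unfold Spec_can_be_found can_be_found can_be_found_alt
  cases h : PySem.List.pyGet? seq index with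
  | none => rfl
  | some elem =>
    exact loop_eq_window seq elem index (seq.length + 1) 0 ((seq.length : Int) - 1) (by omega) (by omega)
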